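-- pv_equiv track=rewrite | github.com/SophieHsu/pddl_variant_automator | transforms.py | _read_typed_object_blocks
-- ===== SOURCE A (Python) =====
-- from typing import List, Dict, Tuple, Optional, Callable, Any
--
-- def _read_typed_object_blocks(objs: List[str]) -> List[Tuple[List[str], str]]:
--     """Given a flat token list from :objects (e.g., ['a','b','-','type','c','-','t2']),
--        return [([names], type), ...]."""
--     groups = []
--     i = 0
--     names = []
--     while i < len(objs):
--         tok = objs[i]
--         if tok == '-':
--             if i+1 >= len(objs):
--                 break
--             typ = objs[i+1]
--             if names:
--                 groups.append((names, typ))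
--             names = []
--             i += 2
--         else:
--             names.append(tok)
--             i += 1
--     if names:
--         # untyped trailing names (rare in typed PDDL); default to 'object'
--         groups.append((names, 'object'))
--     return groups
-- ===== SOURCE B (Python) =====
-- from typing import List, Tuple
--
-- def _read_typed_object_blocks(objs: List[str]) -> List[Tuple[List[str], str]]:
--     """Split on each '-' marker: the tokens before it are the names, the token
--     after it is the type; a trailing block without a type defaults to 'object'."""
--     groups = []
--     toks = objs
--     while '-' in toks:
--         j = toks.index('-')
--         names = toks[:j]
--         rest = toks[j+1:]
--         if not rest:
--             return groups + ([(names, 'object')] if names else [])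
--         if names:
--             groups.append((names, rest[0]))
--         toks = rest[1:]
--     if toks:
--         groups.append((toks, 'object'))
--     return groups
-- ===== Notes on version B (the rewrite author's own statement) =====
-- stated objective: alternative
-- what changed: Replaces A's per-token index walk (i, i+1, i+2 arithmetic with a state machine over a names accumulator) by repeated find-the-next-'-' and list slicing: each iteration locates the dash, slices out the whole names block and the type token at once, and continues on the remainder.
import Mathlib
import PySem

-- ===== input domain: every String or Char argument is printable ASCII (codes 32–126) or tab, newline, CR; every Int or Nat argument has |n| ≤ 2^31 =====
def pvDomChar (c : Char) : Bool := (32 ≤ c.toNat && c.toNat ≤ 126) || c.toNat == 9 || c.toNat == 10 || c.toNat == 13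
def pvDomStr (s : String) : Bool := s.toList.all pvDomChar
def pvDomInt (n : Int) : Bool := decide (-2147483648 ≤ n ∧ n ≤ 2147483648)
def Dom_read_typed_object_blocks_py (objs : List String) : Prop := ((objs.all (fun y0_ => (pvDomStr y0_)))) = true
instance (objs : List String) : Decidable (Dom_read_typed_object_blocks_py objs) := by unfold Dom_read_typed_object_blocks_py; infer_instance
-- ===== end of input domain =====

-- B replaces A's per-token index walk by repeated find-next-'-' plus slicing; same results, alternative structure (no speed claim).

-- ===== PORT A =====
-- while loop of A: state (groups, names), index i; returns the loop-exit state
def readA_loop (objs : List String) (i : Nat) (groups : List (List String × String))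
    (names : List String) : List (List String × String) × List String :=
  if h : i < objs.length then
    let tok := objs[i]
    if tok = "-" then
      if hle : i + 1 ≥ objs.length then (groups, names)
      else
        let typ := objs[i+1]! -- i+1 < length by hle
        readA_loop objs (i + 2) (if names ≠ [] then groups ++ [(names, typ)] else groups) []
    else
      readA_loop objs (i + 1) groups (names ++ [tok])
  else (groups, names)
termination_by objs.length - i
decreasing_by all_goals omega

def read_typed_object_blocks_py (objs : List String) : List (List String × String) :=
  let r := readA_loop objs 0 [] []
  if r.2 ≠ [] then r.1 ++ [(r.2, "object")] else r.1

-- ===== PORT B =====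
-- while loop of B: repeatedly find the next '-', slice off names/type, keep remainder
def readB_loop (toks : List String) (groups : List (List String × String)) :
    List (List String × String) :=
  if _hmem : "-" ∈ toks then
    let j := toks.idxOf "-"
    let names := toks.take j
    let rest := toks.drop (j + 1)
    match hr : rest with
    | [] => groups ++ (if names ≠ [] then [(names, "object")] else [])
    | typ :: rest' =>
        readB_loop rest' (groups ++ (if names ≠ [] then [(names, typ)] else []))
  else groups ++ (if toks ≠ [] then [(toks, "object")] else [])
termination_by toks.length
decreasing_by
  have h1 : (toks.drop (toks.idxOf "-" + 1)).length = toks.length - (toks.idxOf "-" + 1) :=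
    List.length_drop ..
  have h2 : (typ :: rest').length = toks.length - (List.idxOf "-" toks + 1) := by
    rw [← hr]; exact h1
  simp at h2
  omega

def read_typed_object_blocks_py_alt (objs : List String) : List (List String × String) :=
  readB_loop objs []

-- ===== PRECONDITION & SPEC =====
def Spec_read_typed_object_blocks_py (objs : List String) (out : List (List String × String)) : Prop := out = read_typed_object_blocks_py_alt objs
instance (objs : List String) (out : List (List String × String)) : Decidable (Spec_read_typed_object_blocks_py objs out) := by unfold Spec_read_typed_object_blocks_py; infer_instance

-- ===== CLAIM (what is proved, stated in full; the proofs are below) =====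
def Claim_equal_read_typed_object_blocks_py : Prop := ∀ (objs : List String), Dom_read_typed_object_blocks_py objs → Spec_read_typed_object_blocks_py objs (read_typed_object_blocks_py objs)

-- ===== LEMMAS AND PROOFS =====

-- structural mirror of A's while loop, acting on the not-yet-read suffix of objs
def pvLoop : List String → List (List String × String) → List String →
    List (List String × String) × List String
  | [], groups, names => (groups, names)
  | tok :: rest, groups, names =>
    if tok = "-" then
      match rest with
      | [] => (groups, names)
      | typ :: rest' => pvLoop rest' (if names ≠ [] then groups ++ [(names, typ)] else groups) []
    else pvLoop rest groups (names ++ [tok])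

-- A's final flush of the pending names
def pvFlush (r : List (List String × String) × List String) : List (List String × String) :=
  if r.2 ≠ [] then r.1 ++ [(r.2, "object")] else r.1

theorem readA_loop_eq_pvLoop (objs : List String) (i : Nat)
    (groups : List (List String × String)) (names : List String) :
    readA_loop objs i groups names = pvLoop (objs.drop i) groups names := by
  fun_induction readA_loop objs i groups names with
  | case1 i groups names h tok htok hle =>
      have htok' : objs[i] = "-" := htok
      rw [List.drop_eq_getElem_cons h]
      have hnil : objs.drop (i + 1) = [] := List.drop_of_length_le (by omega)
      simp [pvLoop, hnil, htok']
  | case2 i groups names h tok htok hle typ ih =>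
      have htok' : objs[i] = "-" := htok
      have htyp : objs[i+1]! = objs[i+1] := getElem!_pos objs (i+1) (by omega)
      rw [List.drop_eq_getElem_cons h, List.drop_eq_getElem_cons (by omega : i + 1 < objs.length),
        pvLoop.eq_def]
      rw [show typ = objs[i+1] from htyp] at ih ⊢
      simp only [htok']
      simpa using ih
  | case3 i groups names h tok htok ih =>
      have htok' : ¬ objs[i] = "-" := htok
      rw [List.drop_eq_getElem_cons h]
      rw [pvLoop.eq_def]
      simp only [if_neg htok']
      exact ih
  | case4 i groups names h =>
      rw [List.drop_of_length_le (by omega)]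
      simp [pvLoop]

theorem readB_loop_nodash (names : List String) (groups : List (List String × String))
    (h : "-" ∉ names) :
    readB_loop names groups = groups ++ (if names ≠ [] then [(names, "object")] else []) := by
  rw [readB_loop.eq_def]
  simp [h]

theorem readB_loop_last (names : List String) (groups : List (List String × String))
    (h : "-" ∉ names) :
    readB_loop (names ++ ["-"]) groups
      = groups ++ (if names ≠ [] then [(names, "object")] else []) := by
  have hj : (names ++ ["-"]).idxOf "-" = names.length := by
    rw [List.idxOf_append_of_notMem h]; simp
  have htake : (names ++ ["-"]).take names.length = names := List.take_left ..
  have hdrop : (names ++ ["-"]).drop (names.length + 1) = [] :=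
    List.drop_of_length_le (by simp)
  rw [readB_loop.eq_def]
  split
  · simp only [hj, htake]
    split
    · split <;> simp_all
    · next heq =>
        rw [hj, hdrop] at heq
        cases heq
  · next hnm => exact absurd (by simp) hnm

theorem readB_loop_step (names : List String) (typ : String) (l : List String)
    (groups : List (List String × String)) (h : "-" ∉ names) :
    readB_loop (names ++ "-" :: typ :: l) groups
      = readB_loop l (groups ++ (if names ≠ [] then [(names, typ)] else [])) := by
  have hj : (names ++ "-" :: typ :: l).idxOf "-" = names.length := by
    rw [List.idxOf_append_of_notMem h]; simp
  have htake : (names ++ "-" :: typ :: l).take names.length = names := List.take_left ..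
  have hdrop : (names ++ "-" :: typ :: l).drop (names.length + 1) = typ :: l := by
    rw [show names ++ "-" :: typ :: l = (names ++ ["-"]) ++ typ :: l by simp]
    exact List.drop_left' (by simp)
  rw [readB_loop.eq_def]
  split
  · simp only [hj, htake]
    split
    · next heq =>
        rw [hj, hdrop] at heq
        cases heq
    · next heq =>
        rw [hj, hdrop] at heq
        cases heq
        rfl
  · next hnm => exact absurd (by simp) hnm

theorem pvLoop_flush (toks : List String) (groups : List (List String × String))
    (names : List String) :
    "-" ∉ names → pvFlush (pvLoop toks groups names) = readB_loop (names ++ toks) groups := by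
  fun_induction pvLoop toks groups names with
  | case1 groups names =>
      intro h
      rw [List.append_nil, readB_loop_nodash names groups h]
      simp only [pvFlush]
      split <;> simp_all
  | case2 groups names =>
      intro h
      rw [show names ++ ["-"] = names ++ ["-"] from rfl,
        readB_loop_last names groups h]
      simp only [pvFlush]
      split <;> simp_all
  | case3 groups names typ rest' ih =>
      intro h
      rw [readB_loop_step names typ rest' groups h, ih (by simp), List.nil_append]
      congr 1
      split <;> simp
  | case4 tok rest groups names htok ih =>
      intro h
      rw [show names ++ tok :: rest = (names ++ [tok]) ++ rest by simp]
      exact ih (by simp [h]; exact fun e => htok e.symm)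

-- ===== VERDICT (by name: the statement is the Claim_ definition above) =====
theorem read_typed_object_blocks_py_spec : Claim_equal_read_typed_object_blocks_py := by
  intro objs _
  unfold Spec_read_typed_object_blocks_py read_typed_object_blocks_py read_typed_object_blocks_py_alt
  have h1 := readA_loop_eq_pvLoop objs 0 [] []
  have h2 := pvLoop_flush objs [] [] (by simp)
  simp only [List.drop_zero] at h1
  simp only [List.nil_append] at h2
  rw [show (let r := readA_loop objs 0 [] [];
      if r.2 ≠ [] then r.1 ++ [(r.2, "object")] else r.1) = pvFlush (readA_loop objs 0 [] []) from rfl,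
    h1, h2]
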